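-- pv_equiv track=rewrite | github.com/Eckreh/BHN-Tool | helper_functions.py | reduce_ones
-- ===== SOURCE A (Python) =====
-- import copy
--
-- def reduce_ones(array, n):
--     """
--     Reduces consecutive sequences of ones in an array by replacing the last 'n' ones with zeros.
--
--     Parameters
--     ----------
--     array : list
--         The input list containing elements, including ones and zeros.
--     n : int
--         The number of consecutive ones to be replaced with zeros from the end of each sequence.
--
--     Returns
--     -------
--     list
--         A modified list where the last 'n' ones in each consecutive sequence of ones have been replaced with zeros.
--
--     Examples
--     --------
--     >>> reduce_ones([1, 1, 1, 1, 1, 0, 1, 1, 1, 1, 1, 1], 2)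
--                     [1, 1, 1, 0, 0, 0, 1, 1, 1, 1, 0, 0]
--     >>> reduce_ones([1, 1, 1, 0, 1, 1, 1, 1, 1, 1, 1], 1)
--                     [1, 1, 0, 0, 1, 1, 1, 1, 1, 1, 0]
--
--     """
--     arr_copy = copy.deepcopy(array)
--
--     i = 0
--     while i < len(arr_copy):
--         if arr_copy[i] == 1:
--             j = i
--             while j < len(arr_copy) and arr_copy[j] == 1:
--                 j += 1
--
--             for k in range(j - n, j):
--                 if k >= 0:
--                     arr_copy[k] = 0
--             i = j
--         else:
--             i += 1
--
--     return arr_copy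
-- ===== SOURCE B (Python) =====
-- import copy
--
-- def reduce_ones(array, n):
--     """One backward pass: track the distance d from the current index to the
--     nearest run-end of ones on its right; zero the cell whenever d <= n."""
--     out = copy.deepcopy(array)
--     d = None  # distance to the nearest end of a run of ones strictly to the right
--     m = len(array) - 1
--     while m >= 0:
--         if array[m] == 1 and (m + 1 == len(array) or array[m + 1] != 1):
--             d = 1
--         elif d is not None:
--             d += 1
--         if d is not None and d <= n:
--             out[m] = 0
--         m -= 1
--     return out
-- ===== Notes on version B (the rewrite author's own statement) =====
-- stated objective: alternative
-- what changed: Replaces A's forward pointer scan (find each run of ones, then zero an n-cell window backwards from its end) by a single right-to-left pass that keeps one counter d, the distance to the nearest run-end of ones on the right, and zeroes the current cell exactly when d <= n; no run boundaries or backward windows are materialised.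
import Mathlib
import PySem

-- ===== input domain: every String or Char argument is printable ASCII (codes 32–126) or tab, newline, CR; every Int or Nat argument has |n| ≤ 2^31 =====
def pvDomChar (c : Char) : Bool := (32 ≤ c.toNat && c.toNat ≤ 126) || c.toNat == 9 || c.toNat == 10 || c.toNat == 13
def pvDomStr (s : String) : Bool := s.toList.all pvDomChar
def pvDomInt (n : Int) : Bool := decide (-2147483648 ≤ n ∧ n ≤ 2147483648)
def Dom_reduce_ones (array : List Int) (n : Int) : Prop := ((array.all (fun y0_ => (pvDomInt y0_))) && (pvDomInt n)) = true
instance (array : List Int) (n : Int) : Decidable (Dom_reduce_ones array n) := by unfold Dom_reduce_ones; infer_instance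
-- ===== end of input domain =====

-- B replaces A's forward pointer scan with nested backward window-zeroing by a single
-- right-to-left pass that tracks the distance to the nearest run-end of ones
-- (objective: alternative decomposition; return values proved equal).

-- ===== PORT A =====
-- inner while: j = i; while j < len(arr) and arr[j] == 1: j += 1
def innerJA (arr : List Int) (j : Nat) : Nat :=
  if _h : j < arr.length then
    if arr.getD j 0 = 1 then innerJA arr (j + 1) else j
  else j
termination_by arr.length - j

-- cited by reduce_onesGo's decreasing_by (the outer pointer advances)
theorem innerJA_ge (arr : List Int) : ∀ j, j ≤ innerJA arr j := by
  intro j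
  induction j using innerJA.induct arr with
  | case1 j h h1 ih =>
    conv_rhs => rw [innerJA]
    rw [dif_pos h, if_pos h1]; omega
  | case2 j h h1 =>
    conv_rhs => rw [innerJA]
    rw [dif_pos h, if_neg h1]
  | case3 j h =>
    conv_rhs => rw [innerJA]
    rw [dif_neg h]

theorem innerJA_gt (arr : List Int) (i : Nat) (h : i < arr.length) (h1 : arr.getD i 0 = 1) :
    i < innerJA arr i := by
  conv_rhs => rw [innerJA]
  rw [dif_pos h, if_pos h1]
  have := innerJA_ge arr (i + 1); omega

-- for k in range(j - n, j): if k >= 0: arr[k] = 0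
def zeroPassA (arr : List Int) (n : Int) (j : Nat) : List Int :=
  (PySem.List.pyRange ((j : Int) - n) (j : Int) 1).foldl
    (fun acc k => if 0 ≤ k then acc.set k.toNat 0 else acc) arr

-- cited by reduce_onesGo's decreasing_by (assignments keep the length)
theorem pv_len_foldl_setzero (f : List Int → Int → List Int)
    (hf : ∀ a k, (f a k).length = a.length) :
    ∀ (ks : List Int) (a : List Int), (ks.foldl f a).length = a.length := by
  intro ks
  induction ks with
  | nil => intro a; rfl
  | cons k ks ih => intro a; simp only [List.foldl_cons]; rw [ih, hf]

theorem length_zeroPassA (arr : List Int) (n : Int) (j : Nat) :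
    (zeroPassA arr n j).length = arr.length := by
  unfold zeroPassA
  exact pv_len_foldl_setzero _ (fun a k => by split <;> simp) _ _

-- outer while over the pointer i
def reduce_onesGo (arr : List Int) (n : Int) (i : Nat) : List Int :=
  if _h : i < arr.length then
    if _h1 : arr.getD i 0 = 1 then
      reduce_onesGo (zeroPassA arr n (innerJA arr i)) n (innerJA arr i)
    else reduce_onesGo arr n (i + 1)
  else arr
termination_by arr.length - i
decreasing_by
  · rw [length_zeroPassA]; have := innerJA_gt arr i _h _h1; omega
  · omega

def reduce_ones (array : List Int) (n : Int) : List Int :=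
  -- arr_copy = copy.deepcopy(array): ints are immutable, the copy holds the same values
  reduce_onesGo array n 0

-- ===== PORT B =====
-- while m >= 0, reading the original `array`, writing the copy `out`;
-- the Nat argument is m+1, so `altGo … (m+1)` performs the iteration with index m
def altGo (arr : List Int) (n : Int) (out : List Int) (d : Option Int) : Nat → List Int
  | 0 => out
  | m + 1 =>
    let d' : Option Int :=
      if arr.getD m 0 = 1 ∧ (m + 1 = arr.length ∨ arr.getD (m + 1) 0 ≠ 1) then some 1
      else match d with
        | some x => some (x + 1)
        | none => none
    let out' : List Int :=
      match d' with
      | some x => if x ≤ n then out.set m 0 else out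
      | none => out
    altGo arr n out' d' m

def reduce_ones_alt (array : List Int) (n : Int) : List Int :=
  -- out = copy.deepcopy(array): ints are immutable, the copy holds the same values
  altGo array n array none array.length

-- ===== PRECONDITION & SPEC =====
def Spec_reduce_ones (array : List Int) (n : Int) (out : List Int) : Prop := out = reduce_ones_alt array n
instance (array : List Int) (n : Int) (out : List Int) : Decidable (Spec_reduce_ones array n out) := by unfold Spec_reduce_ones; infer_instance

-- ===== CLAIM (what is proved, stated in full; the proofs are below) =====
def Claim_equal_reduce_ones : Prop := ∀ (array : List Int) (n : Int), Dom_reduce_ones array n → Spec_reduce_ones array n (reduce_ones array n)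

-- ===== LEMMAS AND PROOFS =====

theorem getD_oob (arr : List Int) (j : Nat) (h : arr.length ≤ j) : arr.getD j 0 = 0 := by
  simp [List.getD_eq_getElem?_getD, List.getElem?_eq_none h]

-- one-step unfolding equations for innerJA
theorem innerJA_stop (arr : List Int) (i : Nat) (h : ¬ i < arr.length) : innerJA arr i = i := by
  conv_lhs => rw [innerJA]
  rw [dif_neg h]

theorem innerJA_one (arr : List Int) (i : Nat) (h : i < arr.length) (h1 : arr.getD i 0 = 1) :
    innerJA arr i = innerJA arr (i + 1) := by
  conv_lhs => rw [innerJA]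
  rw [dif_pos h, if_pos h1]

theorem innerJA_end (arr : List Int) (i : Nat) (h : i < arr.length) (h1 : ¬ arr.getD i 0 = 1) :
    innerJA arr i = i := by
  conv_lhs => rw [innerJA]
  rw [dif_pos h, if_neg h1]

theorem innerJA_le_len (arr : List Int) : ∀ i, i ≤ arr.length → innerJA arr i ≤ arr.length := by
  intro i
  induction i using innerJA.induct arr with
  | case1 j h h1 ih =>
    intro _
    rw [innerJA_one arr j h h1]
    exact ih (by omega)
  | case2 j h h1 =>
    intro hj
    rw [innerJA_end arr j h h1]; exact hj
  | case3 j h =>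
    intro hj
    rw [innerJA_stop arr j h]; exact hj

theorem innerJA_ones (arr : List Int) :
    ∀ i m, i ≤ m → m < innerJA arr i → arr.getD m 0 = 1 := by
  intro i
  induction i using innerJA.induct arr with
  | case1 j h h1 ih =>
    intro m him hm
    rw [innerJA_one arr j h h1] at hm
    by_cases hmj : m = j
    · rw [hmj]; exact h1
    · exact ih m (by omega) hm
  | case2 j h h1 =>
    intro m him hm
    rw [innerJA_end arr j h h1] at hm; omega
  | case3 j h =>
    intro m him hm
    rw [innerJA_stop arr j h] at hm; omega

theorem innerJA_not_one (arr : List Int) : ∀ j, arr.getD (innerJA arr j) 0 ≠ 1 := by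
  intro j
  induction j using innerJA.induct arr with
  | case1 j h h1 ih =>
    rw [innerJA_one arr j h h1]; exact ih
  | case2 j h h1 =>
    rw [innerJA_end arr j h h1]; exact h1
  | case3 j h =>
    rw [innerJA_stop arr j h]
    rw [getD_oob arr j (by omega)]
    decide

-- A's guarded window never writes at or beyond the run end
theorem getD_foldl_guarded_notmem (m : Nat) :
    ∀ (ks : List Int) (acc : List Int), ((m : Int) ∉ ks) →
      ((ks.foldl (fun a k => if 0 ≤ k then a.set k.toNat 0 else a) acc)).getD m 0 = acc.getD m 0 := by
  intro ks
  induction ks with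
  | nil => intro acc _; rfl
  | cons k ks ih =>
    intro acc hnm
    simp only [List.foldl_cons]
    rw [ih _ (by intro hc; exact hnm (by simp [hc]))]
    by_cases hk : 0 ≤ k
    · have hne : k.toNat ≠ m := by
        intro hc
        apply hnm
        have : k = (m : Int) := by omega
        simp [this]
      simp [hk, List.getD_eq_getElem?_getD, List.getElem?_set_ne hne]
    · simp [hk]

-- pointwise value of A's guarded window fold
theorem getD_foldl_guarded_set (m : Nat) :
    ∀ (ks : List Int) (acc : List Int), m < acc.length →
      ((ks.foldl (fun a k => if 0 ≤ k then a.set k.toNat 0 else a) acc)).getD m 0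
        = if ((m : Int) ∈ ks) then 0 else acc.getD m 0 := by
  intro ks
  induction ks with
  | nil => intro acc _; simp
  | cons k ks ih =>
    intro acc hm
    simp only [List.foldl_cons]
    by_cases hkm : k = (m : Int)
    · have h0 : (0 : Int) ≤ k := by omega
      have hkn : k.toNat = m := by omega
      rw [if_pos h0, hkn]
      rw [ih _ (by simp [hm])]
      have hset : (acc.set m 0).getD m 0 = 0 := by
        rw [List.getD_eq_getElem?_getD, List.getElem?_set_self (by simpa using hm)]
        rfl
      rw [List.getD_eq_getElem?_getD] at hset
      by_cases hmem : (m : Int) ∈ ks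
      · simp [hmem, hkm]
      · simp [hmem, hkm, hset]
    · have hacc' : ∀ a : List Int, a = (if 0 ≤ k then acc.set k.toNat 0 else acc) →
          a.getD m 0 = acc.getD m 0 ∧ a.length = acc.length := by
        intro a ha
        subst ha
        by_cases hk : 0 ≤ k
        · have hne : k.toNat ≠ m := by omega
          simp [hk, List.getD_eq_getElem?_getD, List.getElem?_set_ne hne]
        · simp [hk]
      obtain ⟨hv, hl⟩ := hacc' _ rfl
      rw [ih _ (by rw [hl]; exact hm), hv]
      have hmm : ((m : Int) ∈ k :: ks) ↔ ((m : Int) ∈ ks) := by simp [hkm, eq_comm]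
      by_cases hmem : (m : Int) ∈ ks
      · simp [hmem, hmm]
      · simp [hmem, hmm]

theorem getD_zeroPassA (arr : List Int) (n : Int) (j m : Nat) (hm : m < arr.length) :
    (zeroPassA arr n j).getD m 0
      = if ((j : Int) - n ≤ (m : Int) ∧ (m : Int) < (j : Int)) then 0 else arr.getD m 0 := by
  unfold zeroPassA
  rw [getD_foldl_guarded_set m _ arr hm]
  by_cases h : (j : Int) - n ≤ (m : Int) ∧ (m : Int) < (j : Int)
  · rw [if_pos (PySem.List.mem_pyRange_one.mpr h), if_pos h]
  · rw [if_neg (fun hc => h (PySem.List.mem_pyRange_one.mp hc)), if_neg h]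

theorem getD_zeroPassA_high (arr : List Int) (n : Int) (j m : Nat) (hm : j ≤ m) :
    (zeroPassA arr n j).getD m 0 = arr.getD m 0 := by
  unfold zeroPassA
  refine getD_foldl_guarded_notmem m _ arr (fun hc => ?_)
  rcases PySem.List.mem_pyRange_one.mp hc with ⟨_, h2⟩
  omega

-- the run finder reads only indices ≥ the pointer, so earlier writes do not disturb it
theorem innerJA_congr (arr arr' : List Int) (hl : arr'.length = arr.length) (j : Nat)
    (hg : ∀ m : Nat, j ≤ m → arr'.getD m 0 = arr.getD m 0) :
    ∀ i, j ≤ i → innerJA arr' i = innerJA arr i := by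
  suffices h : ∀ d i, j ≤ i → arr.length - i ≤ d → innerJA arr' i = innerJA arr i by
    intro i hi; exact h (arr.length - i) i hi le_rfl
  intro d
  induction d with
  | zero =>
    intro i hi hd
    rw [innerJA_stop arr' i (by omega), innerJA_stop arr i (by omega)]
  | succ d ih =>
    intro i hi hd
    by_cases hlt : i < arr.length
    · by_cases h1 : arr.getD i 0 = 1
      · rw [innerJA_one arr' i (by omega) (by rw [hg i hi]; exact h1),
            innerJA_one arr i hlt h1]
        exact ih (i + 1) (by omega) (by omega)
      · rw [innerJA_end arr' i (by omega) (by rw [hg i hi]; exact h1),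
            innerJA_end arr i hlt h1]
    · rw [innerJA_stop arr' i (by omega), innerJA_stop arr i (by omega)]

-- the maximal runs of ones of arr from pointer i onwards (A's traversal order)
def runsFromA (arr : List Int) (i : Nat) : List (Nat × Nat) :=
  if _h : i < arr.length then
    if _h1 : arr.getD i 0 = 1 then
      (i, innerJA arr i) :: runsFromA arr (innerJA arr i)
    else runsFromA arr (i + 1)
  else []
termination_by arr.length - i
decreasing_by
  · have := innerJA_gt arr i _h _h1; omega
  · omega

theorem runsFromA_stop (arr : List Int) (i : Nat) (h : ¬ i < arr.length) : runsFromA arr i = [] := by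
  conv_lhs => rw [runsFromA]
  rw [dif_neg h]

theorem runsFromA_one (arr : List Int) (i : Nat) (h : i < arr.length) (h1 : arr.getD i 0 = 1) :
    runsFromA arr i = (i, innerJA arr i) :: runsFromA arr (innerJA arr i) := by
  conv_lhs => rw [runsFromA]
  rw [dif_pos h, dif_pos h1]

theorem runsFromA_skip (arr : List Int) (i : Nat) (h : i < arr.length) (h1 : ¬ arr.getD i 0 = 1) :
    runsFromA arr i = runsFromA arr (i + 1) := by
  conv_lhs => rw [runsFromA]
  rw [dif_pos h, dif_neg h1]

theorem runsFromA_congr (arr arr' : List Int) (hl : arr'.length = arr.length) (j : Nat)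
    (hg : ∀ m : Nat, j ≤ m → arr'.getD m 0 = arr.getD m 0) :
    ∀ i, j ≤ i → runsFromA arr' i = runsFromA arr i := by
  suffices h : ∀ d i, j ≤ i → arr.length - i ≤ d → runsFromA arr' i = runsFromA arr i by
    intro i hi; exact h (arr.length - i) i hi le_rfl
  intro d
  induction d with
  | zero =>
    intro i hi hd
    rw [runsFromA_stop arr' i (by omega), runsFromA_stop arr i (by omega)]
  | succ d ih =>
    intro i hi hd
    by_cases hlt : i < arr.length
    · by_cases h1 : arr.getD i 0 = 1
      · have hJ : innerJA arr' i = innerJA arr i := innerJA_congr arr arr' hl j hg i hi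
        have hj : i < innerJA arr i := innerJA_gt arr i hlt h1
        rw [runsFromA_one arr' i (by omega) (by rw [hg i hi]; exact h1),
            runsFromA_one arr i hlt h1, hJ]
        rw [ih (innerJA arr i) (by omega) (by omega)]
      · rw [runsFromA_skip arr' i (by omega) (by rw [hg i hi]; exact h1),
            runsFromA_skip arr i hlt h1]
        exact ih (i + 1) (by omega) (by omega)
    · rw [runsFromA_stop arr' i (by omega), runsFromA_stop arr i (by omega)]

-- one-step equations for A's outer loop
theorem go_stop (arr : List Int) (n : Int) (i : Nat) (h : ¬ i < arr.length) :
    reduce_onesGo arr n i = arr := by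
  conv_lhs => rw [reduce_onesGo]
  rw [dif_neg h]

theorem go_one (arr : List Int) (n : Int) (i : Nat) (h : i < arr.length) (h1 : arr.getD i 0 = 1) :
    reduce_onesGo arr n i = reduce_onesGo (zeroPassA arr n (innerJA arr i)) n (innerJA arr i) := by
  conv_lhs => rw [reduce_onesGo]
  rw [dif_pos h, dif_pos h1]

theorem go_skip (arr : List Int) (n : Int) (i : Nat) (h : i < arr.length) (h1 : ¬ arr.getD i 0 = 1) :
    reduce_onesGo arr n i = reduce_onesGo arr n (i + 1) := by
  conv_lhs => rw [reduce_onesGo]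
  rw [dif_pos h, dif_neg h1]

-- A's whole loop is the fold of its window pass over the runs
theorem reduce_onesGo_eq (n : Int) :
    ∀ (d : Nat) (arr : List Int) (i : Nat), arr.length - i ≤ d →
      reduce_onesGo arr n i = (runsFromA arr i).foldl (fun acc r => zeroPassA acc n r.2) arr := by
  intro d
  induction d with
  | zero =>
    intro arr i hd
    rw [go_stop arr n i (by omega), runsFromA_stop arr i (by omega)]
    rfl
  | succ d ih =>
    intro arr i hd
    by_cases hlt : i < arr.length
    · by_cases h1 : arr.getD i 0 = 1
      · have hj : i < innerJA arr i := innerJA_gt arr i hlt h1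
        have hlen : (zeroPassA arr n (innerJA arr i)).length = arr.length :=
          length_zeroPassA _ _ _
        rw [go_one arr n i hlt h1]
        rw [ih (zeroPassA arr n (innerJA arr i)) (innerJA arr i) (by omega)]
        rw [runsFromA_congr arr (zeroPassA arr n (innerJA arr i)) hlen (innerJA arr i)
          (fun m hm => getD_zeroPassA_high arr n _ m hm)
          (innerJA arr i) le_rfl]
        rw [runsFromA_one arr i hlt h1]
        rfl
      · rw [go_skip arr n i hlt h1, runsFromA_skip arr i hlt h1]
        exact ih arr (i + 1) (by omega)
    · rw [go_stop arr n i (by omega), runsFromA_stop arr i (by omega)]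
      rfl

-- pointwise value of the fold over the runs
theorem getD_foldl_runs (n : Int) :
    ∀ (runs : List (Nat × Nat)) (acc : List Int) (m : Nat), m < acc.length →
      ((runs.foldl (fun acc r => zeroPassA acc n r.2) acc)).getD m 0
        = if (∃ r ∈ runs, ((r.2 : Int) - n ≤ (m : Int) ∧ (m : Int) < (r.2 : Int)))
          then 0 else acc.getD m 0 := by
  intro runs
  induction runs with
  | nil => intro acc m hm; simp
  | cons r rs ih =>
    intro acc m hm
    simp only [List.foldl_cons]
    rw [ih (zeroPassA acc n r.2) m (by rw [length_zeroPassA]; exact hm),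
        getD_zeroPassA acc n r.2 m hm]
    by_cases hrs : ∃ x ∈ rs, ((x.2 : Int) - n ≤ (m : Int) ∧ (m : Int) < (x.2 : Int))
    · rw [if_pos hrs]
      obtain ⟨x, hx1, hx2⟩ := hrs
      rw [if_pos ⟨x, List.mem_cons_of_mem r hx1, hx2⟩]
    · rw [if_neg hrs]
      by_cases hr : (r.2 : Int) - n ≤ (m : Int) ∧ (m : Int) < (r.2 : Int)
      · rw [if_pos hr, if_pos ⟨r, by simp, hr⟩]
      · rw [if_neg hr]
        rw [if_neg (fun hc => by
          rcases hc with ⟨x, hx1, hx2⟩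
          rcases List.mem_cons.mp hx1 with h | h
          · exact hr (h ▸ hx2)
          · exact hrs ⟨x, h, hx2⟩)]

theorem length_foldl_runs (n : Int) :
    ∀ (runs : List (Nat × Nat)) (acc : List Int),
      ((runs.foldl (fun acc r => zeroPassA acc n r.2) acc)).length = acc.length := by
  intro runs
  induction runs with
  | nil => intro acc; rfl
  | cons r rs ih => intro acc; simp only [List.foldl_cons]; rw [ih, length_zeroPassA]

-- e is the exclusive end index of a maximal run of ones
def RunEnd (arr : List Int) (e : Nat) : Prop :=
  1 ≤ e ∧ e ≤ arr.length ∧ arr.getD (e - 1) 0 = 1 ∧ arr.getD e 0 ≠ 1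

-- nearest run end strictly to the right of m (B's distance counter, as an absolute index)
def nre (arr : List Int) (m : Nat) : Option Nat :=
  if m < arr.length then
    if arr.getD m 0 = 1 ∧ arr.getD (m + 1) 0 ≠ 1 then some (m + 1) else nre arr (m + 1)
  else none
termination_by arr.length - m

theorem nre_stop (arr : List Int) (m : Nat) (h : ¬ m < arr.length) : nre arr m = none := by
  conv_lhs => rw [nre]
  rw [if_neg h]

theorem nre_hit (arr : List Int) (m : Nat) (h : m < arr.length)
    (h1 : arr.getD m 0 = 1 ∧ arr.getD (m + 1) 0 ≠ 1) : nre arr m = some (m + 1) := by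
  conv_lhs => rw [nre]
  rw [if_pos h, if_pos h1]

theorem nre_miss (arr : List Int) (m : Nat) (h : m < arr.length)
    (h1 : ¬ (arr.getD m 0 = 1 ∧ arr.getD (m + 1) 0 ≠ 1)) : nre arr m = nre arr (m + 1) := by
  conv_lhs => rw [nre]
  rw [if_pos h, if_neg h1]

theorem nre_runEnd (arr : List Int) : ∀ m e, nre arr m = some e → RunEnd arr e ∧ m < e := by
  suffices h : ∀ d m e, arr.length - m ≤ d → nre arr m = some e → RunEnd arr e ∧ m < e by
    intro m e hme; exact h (arr.length - m) m e le_rfl hme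
  intro d
  induction d with
  | zero =>
    intro m e hd hme
    rw [nre_stop arr m (by omega)] at hme
    exact absurd hme (by simp)
  | succ d ih =>
    intro m e hd hme
    by_cases hlt : m < arr.length
    · by_cases h1 : arr.getD m 0 = 1 ∧ arr.getD (m + 1) 0 ≠ 1
      · rw [nre_hit arr m hlt h1] at hme
        have he : e = m + 1 := by simpa using hme.symm
        subst he
        exact ⟨⟨by omega, by omega, by simpa using h1.1, h1.2⟩, by omega⟩
      · rw [nre_miss arr m hlt h1] at hme
        have := ih (m + 1) e (by omega) hme
        exact ⟨this.1, by omega⟩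
    · rw [nre_stop arr m hlt] at hme
      exact absurd hme (by simp)

theorem nre_min (arr : List Int) :
    ∀ m e', RunEnd arr e' → m < e' → ∃ e, nre arr m = some e ∧ e ≤ e' := by
  suffices h : ∀ d m e', arr.length - m ≤ d → RunEnd arr e' → m < e' →
      ∃ e, nre arr m = some e ∧ e ≤ e' by
    intro m e' h1 h2; exact h (arr.length - m) m e' le_rfl h1 h2
  intro d
  induction d with
  | zero =>
    intro m e' hd he' hme'
    rcases he' with ⟨_, h2, _, _⟩
    omega
  | succ d ih =>
    intro m e' hd he' hme'
    have hlt : m < arr.length := by rcases he' with ⟨_, h2, _, _⟩; omega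
    by_cases h1 : arr.getD m 0 = 1 ∧ arr.getD (m + 1) 0 ≠ 1
    · exact ⟨m + 1, nre_hit arr m hlt h1, by omega⟩
    · have hne : e' ≠ m + 1 := by
        intro hc
        subst hc
        rcases he' with ⟨_, _, h3, h4⟩
        exact h1 ⟨by simpa using h3, h4⟩
      rw [nre_miss arr m hlt h1]
      exact ih (m + 1) e' (by omega) he' (by omega)

-- the ends reported by A's traversal are exactly the RunEnds to the right of the pointer
theorem runsFromA_runEnd (arr : List Int) :
    ∀ i, i ≤ arr.length → ∀ r ∈ runsFromA arr i, RunEnd arr r.2 ∧ i < r.2 := by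
  suffices h : ∀ d i, arr.length - i ≤ d → i ≤ arr.length →
      ∀ r ∈ runsFromA arr i, RunEnd arr r.2 ∧ i < r.2 by
    intro i hi; exact h (arr.length - i) i le_rfl hi
  intro d
  induction d with
  | zero =>
    intro i hd hi r hr
    rw [runsFromA_stop arr i (by omega)] at hr
    exact absurd hr (by simp)
  | succ d ih =>
    intro i hd hi r hr
    by_cases hlt : i < arr.length
    · by_cases h1 : arr.getD i 0 = 1
      · rw [runsFromA_one arr i hlt h1] at hr
        have hj : i < innerJA arr i := innerJA_gt arr i hlt h1
        have hJlen : innerJA arr i ≤ arr.length := innerJA_le_len arr i hi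
        rcases List.mem_cons.mp hr with hr | hr
        · subst hr
          refine ⟨⟨by omega, hJlen, ?_, innerJA_not_one arr i⟩, by omega⟩
          exact innerJA_ones arr i (innerJA arr i - 1) (by omega) (by omega)
        · have := ih (innerJA arr i) (by omega) hJlen r hr
          exact ⟨this.1, by omega⟩
      · rw [runsFromA_skip arr i hlt h1] at hr
        have := ih (i + 1) (by omega) (by omega) r hr
        exact ⟨this.1, by omega⟩
    · rw [runsFromA_stop arr i hlt] at hr
      exact absurd hr (by simp)

theorem runEnd_mem_runsFromA (arr : List Int) :
    ∀ i e, RunEnd arr e → i < e → ∃ r ∈ runsFromA arr i, r.2 = e := by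
  suffices h : ∀ d i e, arr.length - i ≤ d → RunEnd arr e → i < e →
      ∃ r ∈ runsFromA arr i, r.2 = e by
    intro i e h1 h2; exact h (arr.length - i) i e le_rfl h1 h2
  intro d
  induction d with
  | zero =>
    intro i e hd he hie
    rcases he with ⟨_, h2, _, _⟩
    omega
  | succ d ih =>
    intro i e hd he hie
    have hlt : i < arr.length := by rcases he with ⟨_, h2, _, _⟩; omega
    by_cases h1 : arr.getD i 0 = 1
    · have hj : i < innerJA arr i := innerJA_gt arr i hlt h1
      rw [runsFromA_one arr i hlt h1]
      by_cases hle : e ≤ innerJA arr i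
      · have heq : e = innerJA arr i := by
          by_contra hc
          have helt : e < innerJA arr i := by omega
          have : arr.getD e 0 = 1 := innerJA_ones arr i e (by omega) helt
          exact he.2.2.2 this
        exact ⟨(i, innerJA arr i), by simp, heq.symm⟩
      · obtain ⟨r, hr, hre⟩ := ih (innerJA arr i) e (by omega) he (by omega)
        exact ⟨r, by simp [hr], hre⟩
    · have hne : e ≠ i + 1 := by
        intro hc
        subst hc
        exact h1 (by simpa using he.2.2.1)
      rw [runsFromA_skip arr i hlt h1]
      exact ih (i + 1) e (by omega) he (by omega)

-- B's zeroing condition at index k, as a Bool (nearest run end lies within n to the right)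
def zcB (arr : List Int) (n : Int) (k : Nat) : Bool :=
  match nre arr k with
  | some e => decide ((e : Int) ≤ (k : Int) + n)
  | none => false

-- the existential A's windows realise is exactly B's nearest-run-end test
theorem bridge (arr : List Int) (n : Int) (k : Nat) :
    (∃ r ∈ runsFromA arr 0, ((r.2 : Int) - n ≤ (k : Int) ∧ (k : Int) < (r.2 : Int)))
      ↔ zcB arr n k = true := by
  constructor
  · rintro ⟨r, hr, h1, h2⟩
    have hre := runsFromA_runEnd arr 0 (by omega) r hr
    have hk : k < r.2 := by exact_mod_cast h2
    obtain ⟨e, he, hle⟩ := nre_min arr k r.2 hre.1 hk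
    unfold zcB
    rw [he]
    simp only [decide_eq_true_eq]
    have : (e : Int) ≤ (r.2 : Int) := by exact_mod_cast hle
    omega
  · intro hz
    unfold zcB at hz
    cases hne : nre arr k with
    | none => rw [hne] at hz; simp at hz
    | some e =>
      rw [hne] at hz
      simp only [decide_eq_true_eq] at hz
      have hre := nre_runEnd arr k e hne
      obtain ⟨r, hr, hre2⟩ := runEnd_mem_runsFromA arr 0 e hre.1
        (by rcases hre.1 with ⟨hx, _, _, _⟩; omega)
      refine ⟨r, hr, ?_, ?_⟩
      · rw [hre2]; omega
      · rw [hre2]; exact_mod_cast hre.2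

-- B's distance counter, as an Option over absolute indices
def dOf (arr : List Int) (m : Nat) : Option Int :=
  (nre arr m).map (fun e => (e : Int) - (m : Int))

theorem altGo_succ (arr : List Int) (n : Int) (out : List Int) (d : Option Int) (m : Nat) :
    altGo arr n out d (m + 1)
      = altGo arr n
          (match (if arr.getD m 0 = 1 ∧ (m + 1 = arr.length ∨ arr.getD (m + 1) 0 ≠ 1)
              then some (1 : Int)
              else match d with
                | some x => some (x + 1)
                | none => none) with
            | some x => if x ≤ n then out.set m 0 else out
            | none => out)
          (if arr.getD m 0 = 1 ∧ (m + 1 = arr.length ∨ arr.getD (m + 1) 0 ≠ 1)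
            then some (1 : Int)
            else match d with
              | some x => some (x + 1)
              | none => none)
          m := rfl

theorem length_altGo (arr : List Int) (n : Int) :
    ∀ m out d, (altGo arr n out d m).length = out.length := by
  intro m
  induction m with
  | zero => intro out d; rfl
  | succ m ih =>
    intro out d
    rw [altGo_succ, ih]
    split
    · split <;> simp
    · rfl

-- the invariant of B's single backward pass
theorem altGo_getD (arr : List Int) (n : Int) :
    ∀ m, m ≤ arr.length → ∀ out, out.length = arr.length → ∀ k, k < arr.length →
      (altGo arr n out (dOf arr m) m).getD k 0
        = if (k < m ∧ zcB arr n k = true) then 0 else out.getD k 0 := by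
  intro m
  induction m with
  | zero =>
    intro hm out hout k hk
    simp [altGo]
  | succ m ih =>
    intro hm out hout k hk
    have hmlt : m < arr.length := by omega
    have hcond : (arr.getD m 0 = 1 ∧ (m + 1 = arr.length ∨ arr.getD (m + 1) 0 ≠ 1))
        ↔ (arr.getD m 0 = 1 ∧ arr.getD (m + 1) 0 ≠ 1) := by
      constructor
      · rintro ⟨h1, h2⟩
        refine ⟨h1, ?_⟩
        rcases h2 with h2 | h2
        · rw [getD_oob arr (m + 1) (by omega)]; decide
        · exact h2
      · rintro ⟨h1, h2⟩; exact ⟨h1, Or.inr h2⟩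
    have hd' : (if arr.getD m 0 = 1 ∧ (m + 1 = arr.length ∨ arr.getD (m + 1) 0 ≠ 1)
          then some (1 : Int)
          else match dOf arr (m + 1) with
            | some x => some (x + 1)
            | none => none) = dOf arr m := by
      by_cases hc : arr.getD m 0 = 1 ∧ arr.getD (m + 1) 0 ≠ 1
      · rw [if_pos (hcond.mpr hc)]
        unfold dOf
        rw [nre_hit arr m hmlt hc]
        simp
      · rw [if_neg (fun h => hc (hcond.mp h))]
        unfold dOf
        rw [nre_miss arr m hmlt hc]
        cases hne : nre arr (m + 1) with
        | none => rfl
        | some e =>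
          show some ((e : Int) - ((m : Int) + 1) + 1) = some ((e : Int) - (m : Int))
          congr 1
          ring
    have hout' : (match dOf arr m with
          | some x => if x ≤ n then out.set m 0 else out
          | none => out) = if zcB arr n m then out.set m 0 else out := by
      unfold dOf zcB
      cases hne : nre arr m with
      | none => rfl
      | some e =>
        show (if (e : Int) - (m : Int) ≤ n then out.set m 0 else out)
            = if decide ((e : Int) ≤ (m : Int) + n) = true then out.set m 0 else out
        by_cases hle : (e : Int) ≤ (m : Int) + n
        · rw [if_pos (by omega : (e : Int) - (m : Int) ≤ n)]
          simp [hle]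
        · rw [if_neg (by omega : ¬ (e : Int) - (m : Int) ≤ n)]
          simp [hle]
    rw [altGo_succ, hd', hout']
    rw [ih (by omega) (if zcB arr n m then out.set m 0 else out)
      (by split <;> simp [hout]) k hk]
    by_cases hkm : k < m
    · have hne : m ≠ k := by omega
      have hv : (if zcB arr n m then out.set m 0 else out).getD k 0 = out.getD k 0 := by
        split
        · rw [List.getD_eq_getElem?_getD, List.getElem?_set_ne hne,
              ← List.getD_eq_getElem?_getD]
        · rfl
      by_cases hz : zcB arr n k = true
      · rw [if_pos ⟨hkm, hz⟩, if_pos ⟨by omega, hz⟩]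
      · rw [if_neg (fun hc => hz hc.2), hv, if_neg (fun hc => hz hc.2)]
    · by_cases hkeq : k = m
      · subst hkeq
        have hklen : k < out.length := by omega
        have hv : (if zcB arr n k then out.set k 0 else out).getD k 0
            = if zcB arr n k then 0 else out.getD k 0 := by
          split
          · rw [List.getD_eq_getElem?_getD, List.getElem?_set_self hklen]
            rfl
          · rfl
        rw [if_neg (fun hc => absurd hc.1 (lt_irrefl k)), hv]
        by_cases hz : zcB arr n k = true
        · rw [if_pos hz, if_pos ⟨by omega, hz⟩]
        · rw [if_neg hz, if_neg (fun hc => hz hc.2)]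
      · have hkm1 : ¬ k < m + 1 := by omega
        have hne : m ≠ k := by omega
        have hv : (if zcB arr n m then out.set m 0 else out).getD k 0 = out.getD k 0 := by
          split
          · rw [List.getD_eq_getElem?_getD, List.getElem?_set_ne hne,
                ← List.getD_eq_getElem?_getD]
          · rfl
        rw [if_neg (fun hc => hkm hc.1), hv, if_neg (fun hc => hkm1 hc.1)]

-- ===== VERDICT (by name: the statement is the Claim_ definition above) =====
theorem reduce_ones_spec : Claim_equal_reduce_ones := by
  intro array n _
  unfold Spec_reduce_ones reduce_ones reduce_ones_alt
  have hnone : (none : Option Int) = dOf array array.length := by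
    unfold dOf
    rw [nre_stop array array.length (by omega)]
    rfl
  rw [reduce_onesGo_eq n array.length array 0 (by omega), hnone]
  have hlenA : ((runsFromA array 0).foldl (fun acc r => zeroPassA acc n r.2) array).length
      = array.length := length_foldl_runs n _ _
  have hlenB : (altGo array n array (dOf array array.length) array.length).length
      = array.length := length_altGo array n _ _ _
  apply List.ext_getElem (by omega)
  intro i h1 h2
  have hi : i < array.length := by omega
  have hgA : ((runsFromA array 0).foldl (fun acc r => zeroPassA acc n r.2) array).getD i 0
      = if (∃ r ∈ runsFromA array 0, ((r.2 : Int) - n ≤ (i : Int) ∧ (i : Int) < (r.2 : Int)))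
        then 0 else array.getD i 0 := getD_foldl_runs n _ array i hi
  have hgB : (altGo array n array (dOf array array.length) array.length).getD i 0
      = if (i < array.length ∧ zcB array n i = true) then 0 else array.getD i 0 :=
    altGo_getD array n array.length le_rfl array rfl i hi
  have hgetA : ((runsFromA array 0).foldl (fun acc r => zeroPassA acc n r.2) array).getD i 0
      = ((runsFromA array 0).foldl (fun acc r => zeroPassA acc n r.2) array)[i]'h1 := by
    rw [List.getD_eq_getElem?_getD, List.getElem?_eq_getElem h1]
    rfl
  have hgetB : (altGo array n array (dOf array array.length) array.length).getD i 0
      = (altGo array n array (dOf array array.length) array.length)[i]'h2 := by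
    rw [List.getD_eq_getElem?_getD, List.getElem?_eq_getElem h2]
    rfl
  rw [← hgetA, ← hgetB, hgA, hgB]
  by_cases hz : zcB array n i = true
  · rw [if_pos ((bridge array n i).mpr hz), if_pos ⟨hi, hz⟩]
  · rw [if_neg (fun hc => hz ((bridge array n i).mp hc)),
        if_neg (fun hc => hz hc.2)]
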